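-- pv_equiv track=rewrite | github.com/jainaman224/Algo_Ds_Notes | Circle_Sort/Circle_Sort.py | circle_sort_rec
-- ===== SOURCE A (Python) =====
-- from math import floor
--
-- def circle_sort_rec(arr, start, end):
--     swaped = False
--     if (end - start) < 2:
--         if arr[start] > arr[end]:
--             swap(arr, start, end)
--             swaped = True
--         return swaped
--     mid = int(floor((start + end)/2))
--     for i in range(start, mid+1):
--         if i == start+end-i:
--             if arr[i] > arr[i+1]:
--                 swap(arr, i, i+1)
--                 swaped = True
--         else:
--             if arr[i] > arr[start+end-i]:
--                 swap(arr, i, start+end-i)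
--                 swaped = True
--     if circle_sort_rec(arr, start, mid):
--         swaped = True
--     if circle_sort_rec(arr, mid+1, end):
--         swaped = True
--     return swaped
--
-- def swap(arr, pos1, pos2):
--     arr[pos1], arr[pos2] = arr[pos2], arr[pos1]
-- ===== SOURCE B (Python) =====
-- from math import floor
--
-- def circle_sort_rec(arr, start, end):
--     # Iterative circle-sort pass: explicit stack of (start,end) ranges instead of recursion.
--     # Equivalence claimed about the return value; the in-place mutation of arr is identical to A's.
--     swaped = False
--     stack = [(start, end)]
--     while stack:
--         s, e = stack.pop()
--         if e - s < 2:
--             if arr[s] > arr[e]: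
--                 arr[s], arr[e] = arr[e], arr[s]
--                 swaped = True
--             continue
--         mid = int(floor((s + e) / 2))
--         for i in range(s, mid + 1):
--             j = s + e - i
--             if i == j:
--                 if arr[i] > arr[i + 1]:
--                     arr[i], arr[i + 1] = arr[i + 1], arr[i]
--                     swaped = True
--             elif arr[i] > arr[j]:
--                 arr[i], arr[j] = arr[j], arr[i]
--                 swaped = True
--         stack.append((mid + 1, e))
--         stack.append((s, mid))
--     return swaped
-- ===== Notes on version B (the rewrite author's own statement) =====
-- stated objective: alternative
-- what changed: A's recursion is replaced by an iterative loop driven by an explicit stack of (start,end) ranges (left half pushed last so it is processed first), with the swapped flag OR-accumulated across all processed ranges; the comparison/swap schedule is unchanged.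
import Mathlib
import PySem

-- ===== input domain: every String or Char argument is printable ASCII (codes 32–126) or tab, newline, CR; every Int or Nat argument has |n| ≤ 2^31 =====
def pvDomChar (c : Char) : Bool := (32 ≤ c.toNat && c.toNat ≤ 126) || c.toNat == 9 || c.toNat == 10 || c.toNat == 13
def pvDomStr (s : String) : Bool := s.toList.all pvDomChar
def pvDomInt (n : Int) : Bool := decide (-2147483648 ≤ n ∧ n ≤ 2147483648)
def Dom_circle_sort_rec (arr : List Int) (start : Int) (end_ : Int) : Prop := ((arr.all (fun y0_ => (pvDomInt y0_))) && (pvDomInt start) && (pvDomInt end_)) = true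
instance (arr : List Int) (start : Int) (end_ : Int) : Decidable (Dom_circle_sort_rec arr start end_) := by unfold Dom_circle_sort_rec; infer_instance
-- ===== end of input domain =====

-- B replaces A's recursion by an iterative loop over an explicit stack of (start,end) ranges
-- (same comparisons/swaps in the same order); equivalence is about the RETURN VALUE — both
-- versions perform the identical in-place mutation of arr, which the ports thread explicitly.

-- ===== PORT A =====
-- shared low-level helpers (both Pythons contain this very code): Python's
-- 'arr[p1], arr[p2] = arr[p2], arr[p1]' (reads both, then writes p1 then p2; IndexError = none → untouched)
def swapL (arr : List Int) (p1 p2 : Int) : List Int :=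
  match PySem.List.pyGet? arr p1, PySem.List.pyGet? arr p2 with
  | some v1, some v2 => PySem.List.pySetD (PySem.List.pySetD arr p1 v2) p2 v1
  | _, _ => arr

-- the base case 'if arr[start] > arr[end]: swap; swaped = True' (identical in A and B)
def baseStep (arr : List Int) (s e : Int) : List Int × Bool :=
  match PySem.List.pyGet? arr s, PySem.List.pyGet? arr e with
  | some x, some y => if x > y then (swapL arr s e, true) else (arr, false)
  | _, _ => (arr, false)

-- one iteration of the mirror loop body (identical in A and B)
def mirrorStep (s e : Int) (st : List Int × Bool) (i : Int) : List Int × Bool :=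
  if i = s + e - i then
    match PySem.List.pyGet? st.1 i, PySem.List.pyGet? st.1 (i + 1) with
    | some x, some y => if x > y then (swapL st.1 i (i + 1), true) else (st.1, st.2)
    | _, _ => (st.1, st.2)
  else
    match PySem.List.pyGet? st.1 i, PySem.List.pyGet? st.1 (s + e - i) with
    | some x, some y => if x > y then (swapL st.1 i (s + e - i), true) else (st.1, st.2)
    | _, _ => (st.1, st.2)

-- 'for i in range(start, mid+1): …' starting from swaped = False
def mirrorPass (arr : List Int) (s e mid : Int) : List Int × Bool :=
  (PySem.List.pyRange s (mid + 1) 1).foldl (mirrorStep s e) (arr, false)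

-- termination facts for the two loops (cited by name in decreasing_by)
lemma midDecL {s e : Int} (h : ¬ e - s < 2) :
    (PySem.Int.floordiv (s + e) 2 - s).toNat < (e - s).toNat := by
  have h2 : PySem.Int.floordiv (s + e) 2 = (s + e) / 2 :=
    PySem.Int.floordiv_eq_ediv_of_pos (by omega)
  omega

lemma midDecR {s e : Int} (h : ¬ e - s < 2) :
    (e - (PySem.Int.floordiv (s + e) 2 + 1)).toNat < (e - s).toNat := by
  have h2 : PySem.Int.floordiv (s + e) 2 = (s + e) / 2 :=
    PySem.Int.floordiv_eq_ediv_of_pos (by omega)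
  omega

-- A's recursion, threading the mutated list; 'int(floor((s+e)/2))' is floor division by 2
-- (exact: |s+e| ≤ 2^32 < 2^53 on Dom)
def goA (arr : List Int) (s e : Int) : List Int × Bool :=
  if h : e - s < 2 then baseStep arr s e
  else
    let mid := PySem.Int.floordiv (s + e) 2
    let p1 := goA (mirrorPass arr s e mid).1 s mid
    let sw1 := if p1.2 then true else (mirrorPass arr s e mid).2
    let p2 := goA p1.1 (mid + 1) e
    (p2.1, if p2.2 then true else sw1)
  termination_by (e - s).toNat
  decreasing_by
    · exact midDecL h
    · exact midDecR h

def circle_sort_rec (arr : List Int) (start : Int) (end_ : Int) : Bool :=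
  (goA arr start end_).2

-- ===== PORT B =====
-- total size of the pending ranges, for termination of the stack loop
def stackSize : List (Int × Int) → Nat
  | [] => 0
  | (s, e) :: r => (e - s).toNat + stackSize r

lemma stackDecBase (s e : Int) (rest : List (Int × Int)) :
    2 * stackSize rest + rest.length <
      2 * stackSize ((s, e) :: rest) + ((s, e) :: rest).length := by
  simp only [stackSize, List.length_cons]; omega

lemma stackDecSplit {s e : Int} (rest : List (Int × Int)) (h : ¬ e - s < 2) :
    2 * stackSize ((s, PySem.Int.floordiv (s + e) 2) ::
        (PySem.Int.floordiv (s + e) 2 + 1, e) :: rest) +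
      ((s, PySem.Int.floordiv (s + e) 2) ::
        (PySem.Int.floordiv (s + e) 2 + 1, e) :: rest).length <
      2 * stackSize ((s, e) :: rest) + ((s, e) :: rest).length := by
  have h2 : PySem.Int.floordiv (s + e) 2 = (s + e) / 2 :=
    PySem.Int.floordiv_eq_ediv_of_pos (by omega)
  simp only [stackSize, List.length_cons]; omega

-- B's while loop: pop a range, process it, push the two halves (left on top)
def goB (arr : List Int) (stack : List (Int × Int)) (sw : Bool) : List Int × Bool :=
  match stack with
  | [] => (arr, sw)
  | (s, e) :: rest =>
    if h : e - s < 2 then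
      goB (baseStep arr s e).1 rest (sw || (baseStep arr s e).2)
    else
      let mid := PySem.Int.floordiv (s + e) 2
      goB (mirrorPass arr s e mid).1 ((s, mid) :: (mid + 1, e) :: rest)
        (sw || (mirrorPass arr s e mid).2)
  termination_by 2 * stackSize stack + stack.length
  decreasing_by
    · exact stackDecBase s e rest
    · exact stackDecSplit rest h

def circle_sort_rec_alt (arr : List Int) (start : Int) (end_ : Int) : Bool :=
  (goB arr [(start, end_)] false).2

-- ===== PRECONDITION & SPEC =====
-- Pre_ = exactly the inputs on which the Python A returns (no IndexError): every index the pass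
-- touches lies in [start, end_] when start ≤ end_, and only start and end_ are touched when
-- end_ < start (degenerate base case); Python indices are valid in [-len, len).
def Pre_circle_sort_rec (arr : List Int) (start : Int) (end_ : Int) : Prop :=
  (start ≤ end_ ∧ -(arr.length : Int) ≤ start ∧ end_ < (arr.length : Int)) ∨
  (end_ < start ∧ -(arr.length : Int) ≤ start ∧ start < (arr.length : Int) ∧
    -(arr.length : Int) ≤ end_ ∧ end_ < (arr.length : Int))
instance (arr : List Int) (start : Int) (end_ : Int) : Decidable (Pre_circle_sort_rec arr start end_) := by
  unfold Pre_circle_sort_rec; infer_instance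

def pvWitness_circle_sort_rec : List Int × Int × Int := ([3, 1, 4, 1, 5], 0, 4)

def Spec_circle_sort_rec (arr : List Int) (start : Int) (end_ : Int) (out : Bool) : Prop := out = circle_sort_rec_alt arr start end_
instance (arr : List Int) (start : Int) (end_ : Int) (out : Bool) : Decidable (Spec_circle_sort_rec arr start end_ out) := by unfold Spec_circle_sort_rec; infer_instance

-- ===== CLAIM (what is proved, stated in full; the proofs are below) =====
def Claim_equal_circle_sort_rec : Prop := ∀ (arr : List Int) (start : Int) (end_ : Int), Dom_circle_sort_rec arr start end_ → Pre_circle_sort_rec arr start end_ → Spec_circle_sort_rec arr start end_ (circle_sort_rec arr start end_)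

-- ===== LEMMAS AND PROOFS =====
-- The stack loop processed on a range equals A's recursion on that range, then continues
-- with the rest of the stack, OR-ing the flag (unconditional: needs no precondition).
lemma goB_cons (n : Nat) : ∀ (arr : List Int) (s e : Int) (rest : List (Int × Int)) (sw : Bool),
    (e - s).toNat ≤ n →
    goB arr ((s, e) :: rest) sw = goB (goA arr s e).1 rest (sw || (goA arr s e).2) := by
  induction n using Nat.strong_induction_on with
  | _ n ih =>
    intro arr s e rest sw hle
    by_cases h : e - s < 2
    · rw [goB, goA]; simp only [dif_pos h]
    · have hpos : 0 < n := by omega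
      have h2 : PySem.Int.floordiv (s + e) 2 = (s + e) / 2 :=
        PySem.Int.floordiv_eq_ediv_of_pos (by omega)
      rw [goB, goA]
      simp only [dif_neg h]
      set mid := PySem.Int.floordiv (s + e) 2 with hmid
      have hm1 : (mid - s).toNat < n := by omega
      have hm2 : (e - (mid + 1)).toNat < n := by omega
      rw [ih _ hm1 _ _ _ _ _ (by omega), ih _ hm2 _ _ _ _ _ (by omega)]
      congr 1
      cases (mirrorPass arr s e mid).2 <;>
        cases (goA (mirrorPass arr s e mid).1 s mid).2 <;>
        cases (goA (goA (mirrorPass arr s e mid).1 s mid).1 (mid + 1) e).2 <;>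
        cases sw <;> rfl

-- ===== VERDICT (by name: the statement is the Claim_ definition above) =====
theorem circle_sort_rec_spec : Claim_equal_circle_sort_rec := by
  intro arr start end_ _ _
  unfold Spec_circle_sort_rec circle_sort_rec circle_sort_rec_alt
  rw [goB_cons (end_ - start).toNat arr start end_ [] false le_rfl]
  rw [goB]
  simp
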